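-- pv_equiv track=rewrite | github.com/pypi-data/pypi-mirror-98 | packages/nmt/nmt-0.0.6-py2.py3-none-any.whl/nmt/utils/token_intersection.py | overlapping_words
-- ===== SOURCE A (Python) =====
-- from collections import Counter
--
-- def overlapping_words(tokens, reference_tokens):
--     """ Count number of words in tokens that are in the reference_tokens sequence
--
--     # "advance" occurs 2 times in reference, "to" occurs 1 time, "we" occurs 1 time
--     # 2 + 1 + 1 => 4
--     >>> overlapping_words(
--     ...     spacy_tokenize("We're going to advance!".lower()),
--     ...     spacy_tokenize("Advance! We'll stop at nothing to advance!".lower()))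
--     4
--     >>> overlapping_words(
--     ...     "life is stronger than metal and stone , more powerful than typhoons and volcanoes".split(),
--     ...     "life is stronger than metal stones , more volcano and typhoon than powerful".split())
--     10
--     """
--     tokens_counter = Counter()
--     reference_tokens_counter = Counter()
--
--     tokens_counter.update(tokens)
--     reference_tokens_counter.update(reference_tokens)
--
--     count = 0
--     for token in reference_tokens_counter.keys():
--         reference_count = reference_tokens_counter.get(token, 0)
--         sent_count = tokens_counter.get(token, 0)
--
--         if sent_count >= reference_count:
--             count += reference_count
--         else:
--             count += sent_count
--
--     return count
-- ===== SOURCE B (Python) =====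
-- from collections import Counter
--
-- def overlapping_words(tokens, reference_tokens):
--     """Sum over distinct reference tokens of min(count in tokens, count in reference),
--     computed by greedy consumption: one Counter over tokens, one pass over the raw
--     reference sequence consuming an available token per step."""
--     remaining = Counter(tokens)
--     count = 0
--     for token in reference_tokens:
--         if remaining[token] > 0:
--             count += 1
--             remaining[token] -= 1
--     return count
-- ===== Notes on version B (the rewrite author's own statement) =====
-- stated objective: alternative
-- what changed: Replaces the two-Counter build plus key-iteration summing min(sent,ref) per distinct token by a single Counter over tokens and a greedy one-pass consumption over the raw reference sequence (increment and decrement while a matching token remains), which yields the same per-token min by consumption.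
import Mathlib
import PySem

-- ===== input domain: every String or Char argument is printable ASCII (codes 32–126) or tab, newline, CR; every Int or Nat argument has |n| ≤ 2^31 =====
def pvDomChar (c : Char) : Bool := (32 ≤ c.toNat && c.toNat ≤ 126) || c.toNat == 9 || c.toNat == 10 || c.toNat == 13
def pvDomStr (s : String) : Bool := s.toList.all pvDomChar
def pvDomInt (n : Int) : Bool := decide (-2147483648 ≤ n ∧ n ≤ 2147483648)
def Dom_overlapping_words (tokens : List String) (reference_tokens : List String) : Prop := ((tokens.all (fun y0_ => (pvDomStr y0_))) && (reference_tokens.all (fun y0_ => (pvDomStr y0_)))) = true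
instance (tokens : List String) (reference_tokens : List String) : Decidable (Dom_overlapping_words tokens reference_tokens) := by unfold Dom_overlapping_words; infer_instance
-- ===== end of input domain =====

-- B replaces A's two Counters + key iteration (summing min per distinct token) by one Counter
-- over tokens and a greedy consuming pass over the raw reference sequence (objective: alternative).


-- ===== PORT A =====
def overlapping_words (tokens : List String) (reference_tokens : List String) : Int :=
  let tokens_counter := PySem.Dict.counter tokens
  let reference_tokens_counter := PySem.Dict.counter reference_tokens
  reference_tokens_counter.keys.foldl (fun count token =>
    let reference_count := reference_tokens_counter.getD token 0
    let sent_count := tokens_counter.getD token 0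
    if sent_count ≥ reference_count then count + reference_count else count + sent_count) 0

-- ===== PORT B =====
def overlapping_words_alt (tokens : List String) (reference_tokens : List String) : Int :=
  (reference_tokens.foldl
    (fun (st : PySem.Dict String Int × Int) (token : String) =>
      if st.1.getD token 0 > 0 then (st.1.modify token 0 (· - 1), st.2 + 1) else st)
    (PySem.Dict.counter tokens, 0)).2

-- ===== PRECONDITION & SPEC =====
def Spec_overlapping_words (tokens : List String) (reference_tokens : List String) (out : Int) : Prop := out = overlapping_words_alt tokens reference_tokens
instance (tokens : List String) (reference_tokens : List String) (out : Int) : Decidable (Spec_overlapping_words tokens reference_tokens out) := by unfold Spec_overlapping_words; infer_instance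

-- ===== CLAIM (what is proved, stated in full; the proofs are below) =====
def Claim_equal_overlapping_words : Prop := ∀ (tokens : List String) (reference_tokens : List String), Dom_overlapping_words tokens reference_tokens → Spec_overlapping_words tokens reference_tokens (overlapping_words tokens reference_tokens)

-- ===== LEMMAS AND PROOFS =====

-- A's loop body: the if-min branch as an accumulator step.
lemma pv_ifmin (c : ℤ) (s r : ℕ) :
    (if (s:ℤ) ≥ (r:ℤ) then c + (r:ℤ) else c + (s:ℤ)) = c + ((min s r : ℕ) : ℤ) := by
  split <;> omega

-- A equals the sum, over the distinct reference tokens, of min of the two counts.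
lemma pv_A_eq (tokens reference_tokens : List String) :
    overlapping_words tokens reference_tokens =
      ∑ t ∈ reference_tokens.toFinset,
        ((min (tokens.count t) (reference_tokens.count t) : ℕ) : ℤ) := by
  unfold overlapping_words
  simp only [PySem.Dict.keys_counter, PySem.Dict.getD_counter]
  simp only [pv_ifmin]
  rw [PySem.List.foldl_add]
  rw [← PySem.List.dedup_eq_ofList]
  rw [← List.sum_toFinset _ (PySem.List.nodup_dedup _)]
  have hfs : (PySem.List.dedup reference_tokens).toFinset = reference_tokens.toFinset := by
    ext x; simp
  rw [hfs]
  simp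

-- B's greedy consumption loop, under the invariant that the dict holds the counts f,
-- accumulates the same per-token min over the distinct tokens of the remaining list.
lemma pv_greedy (refs : List String) :
    ∀ (d : PySem.Dict String Int) (acc : ℤ) (f : String → ℕ),
    (∀ t, d.getD t 0 = (f t : ℤ)) →
    (refs.foldl
      (fun (st : PySem.Dict String Int × Int) (token : String) =>
        if st.1.getD token 0 > 0 then (st.1.modify token 0 (· - 1), st.2 + 1) else st)
      (d, acc)).2 = acc + ∑ t ∈ refs.toFinset, ((min (f t) (refs.count t) : ℕ) : ℤ) := by
  induction refs with
  | nil => intro d acc f h; simp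
  | cons r rs ih =>
    intro d acc f h
    rw [List.foldl_cons]
    by_cases hr : 0 < f r
    · have hcond : d.getD r 0 > 0 := by rw [h r]; exact_mod_cast hr
      simp only [hcond, if_pos]
      have h' : ∀ t, (d.modify r 0 (· - 1)).getD t 0 = ((if t = r then f r - 1 else f t : ℕ) : ℤ) := by
        intro t
        rw [PySem.Dict.getD_modify]
        split <;> rename_i ht
        · subst ht; rw [h]; omega
        · rw [h]
      rw [ih _ _ _ h']
      rw [List.toFinset_cons]
      by_cases hm : r ∈ rs.toFinset
      · rw [Finset.insert_eq_self.mpr hm]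
        rw [← Finset.add_sum_erase _ _ hm, ← Finset.add_sum_erase _ _ hm]
        have hrest : ∑ t ∈ rs.toFinset.erase r, ((min (if t = r then f r - 1 else f t) (rs.count t) : ℕ) : ℤ)
            = ∑ t ∈ rs.toFinset.erase r, ((min (f t) ((r :: rs).count t) : ℕ) : ℤ) := by
          apply Finset.sum_congr rfl
          intro t ht
          have htr : t ≠ r := Finset.ne_of_mem_erase ht
          simp [htr, Ne.symm htr]
        rw [hrest]
        have hhead : ((min (f r) ((r :: rs).count r) : ℕ) : ℤ)
            = ((min (if r = r then f r - 1 else f r) (rs.count r) : ℕ) : ℤ) + 1 := by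
          simp
          omega
        rw [hhead]; ring
      · rw [Finset.sum_insert hm]
        have hrs : r ∉ rs := by simpa using hm
        have hhead : ((min (f r) ((r :: rs).count r) : ℕ) : ℤ) = 1 := by
          simp [List.count_eq_zero.mpr hrs]
          omega
        have hrest : ∑ t ∈ rs.toFinset, ((min (if t = r then f r - 1 else f t) (rs.count t) : ℕ) : ℤ)
            = ∑ t ∈ rs.toFinset, ((min (f t) ((r :: rs).count t) : ℕ) : ℤ) := by
          apply Finset.sum_congr rfl
          intro t ht
          have htr : t ≠ r := fun e => hm (e ▸ ht)
          simp [htr, Ne.symm htr]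
        rw [hrest, hhead]; ring
    · have hcond : ¬ d.getD r 0 > 0 := by rw [h r]; omega
      simp only [hcond, if_neg, not_false_iff]
      rw [ih _ _ _ h]
      rw [List.toFinset_cons]
      have hfr : f r = 0 := by omega
      by_cases hm : r ∈ rs.toFinset
      · rw [Finset.insert_eq_self.mpr hm]
        congr 1
        apply Finset.sum_congr rfl
        intro t ht
        by_cases htr : t = r
        · subst htr; simp [hfr]
        · simp [Ne.symm htr]
      · rw [Finset.sum_insert hm]
        have hhead : ((min (f r) ((r :: rs).count r) : ℕ) : ℤ) = 0 := by simp [hfr]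
        have hrest : ∑ t ∈ rs.toFinset, ((min (f t) (rs.count t) : ℕ) : ℤ)
            = ∑ t ∈ rs.toFinset, ((min (f t) ((r :: rs).count t) : ℕ) : ℤ) := by
          apply Finset.sum_congr rfl
          intro t ht
          have htr : t ≠ r := fun e => hm (e ▸ ht)
          simp [Ne.symm htr]
        rw [hrest, hhead]; ring

-- B equals the same sum: start pv_greedy from the tokens counter.
lemma pv_B_eq (tokens reference_tokens : List String) :
    overlapping_words_alt tokens reference_tokens =
      ∑ t ∈ reference_tokens.toFinset,
        ((min (tokens.count t) (reference_tokens.count t) : ℕ) : ℤ) := by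
  unfold overlapping_words_alt
  rw [pv_greedy reference_tokens (PySem.Dict.counter tokens) 0 (fun t => tokens.count t)
      (fun t => PySem.Dict.getD_counter tokens t)]
  simp

-- ===== VERDICT (by name: the statement is the Claim_ definition above) =====
theorem overlapping_words_spec : Claim_equal_overlapping_words := by
  intro tokens reference_tokens _
  unfold Spec_overlapping_words
  rw [pv_A_eq, pv_B_eq]
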